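-- pv_equiv track=rewrite | github.com/williamli20140605/wlsslm | scripts/pack_docs.py | split_docs
-- ===== SOURCE A (Python) =====
-- def split_docs(text: str, mode: str) -> list[str]:
--     if mode == "lines":
--         return [line for line in text.splitlines() if line.strip()]
--
--     docs: list[str] = []
--     current: list[str] = []
--     for line in text.splitlines():
--         if line.strip():
--             current.append(line)
--             continue
--         if current:
--             docs.append("\n".join(current))
--             current = []
--
--     if current:
--         docs.append("\n".join(current))
--     return docs
-- ===== SOURCE B (Python) =====
-- def split_docs(text: str, mode: str) -> list[str]:
--     lines = text.splitlines()
--     if mode == "lines":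
--         return [line for line in lines if line.strip()]
--     docs: list[str] = []
--     while lines:
--         if not lines[0].strip():
--             lines = lines[1:]
--             continue
--         k = 1
--         while k < len(lines) and lines[k].strip():
--             k += 1
--         docs.append("\n".join(lines[:k]))
--         lines = lines[k:]
--     return docs
-- ===== Notes on version B (the rewrite author's own statement) =====
-- stated objective: alternative
-- what changed: Replaces A's line-by-line state machine (a 'current' accumulator flushed at blank lines and at EOF) with a run-scan that finds each maximal run of non-blank lines and joins it directly, with no pending-accumulator state.
import Mathlib
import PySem

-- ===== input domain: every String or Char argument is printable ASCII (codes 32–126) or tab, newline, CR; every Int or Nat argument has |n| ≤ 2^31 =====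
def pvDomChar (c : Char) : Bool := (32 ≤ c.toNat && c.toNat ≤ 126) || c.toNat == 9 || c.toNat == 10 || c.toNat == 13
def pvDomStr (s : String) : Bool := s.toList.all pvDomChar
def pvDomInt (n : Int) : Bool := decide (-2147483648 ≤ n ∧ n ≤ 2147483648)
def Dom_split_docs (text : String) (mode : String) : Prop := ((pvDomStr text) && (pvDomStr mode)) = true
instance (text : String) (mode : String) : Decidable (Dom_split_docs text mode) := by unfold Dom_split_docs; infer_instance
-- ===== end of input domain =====

-- B replaces A's blank-line state machine (a 'current' accumulator flushed at blank lines
-- and at EOF) with a run-scan joining each maximal run of non-blank lines directly ('alternative').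

-- ===== PORT A =====
-- the for-loop of A as structural recursion over (docs, current)
def pvLoopA : List String → List String → List String → List String × List String
  | [], docs, cur => (docs, cur)
  | line :: rest, docs, cur =>
    if PySem.Str.strip line != "" then pvLoopA rest docs (cur ++ [line])
    else if cur != [] then pvLoopA rest (docs ++ [PySem.Str.join "\n" cur]) []
    else pvLoopA rest docs cur

def split_docs (text : String) (mode : String) : List String :=
  if mode == "lines" then
    (PySem.Str.splitlines text).filter (fun line => PySem.Str.strip line != "")
  else
    let s := pvLoopA (PySem.Str.splitlines text) [] []
    if s.2 != [] then s.1 ++ [PySem.Str.join "\n" s.2] else s.1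

-- ===== PORT B =====
-- B's while-loop: skip a blank line, or slice off the maximal non-blank run lines[:k]
def pvChunks : List String → List String
  | [] => []
  | line :: rest =>
    if PySem.Str.strip line == "" then pvChunks rest
    else
      PySem.Str.join "\n" (line :: rest.takeWhile (fun x => PySem.Str.strip x != "")) ::
        pvChunks (rest.dropWhile (fun x => PySem.Str.strip x != ""))
termination_by l => l.length
decreasing_by
  · simp
  · exact Nat.lt_succ_of_le (List.length_dropWhile_le _ _)

def split_docs_alt (text : String) (mode : String) : List String :=
  if mode == "lines" then
    (PySem.Str.splitlines text).filter (fun line => PySem.Str.strip line != "")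
  else pvChunks (PySem.Str.splitlines text)

-- ===== PRECONDITION & SPEC =====
def Spec_split_docs (text : String) (mode : String) (out : List String) : Prop := out = split_docs_alt text mode
instance (text : String) (mode : String) (out : List String) : Decidable (Spec_split_docs text mode out) := by unfold Spec_split_docs; infer_instance

-- ===== CLAIM (what is proved, stated in full; the proofs are below) =====
def Claim_equal_split_docs : Prop := ∀ (text : String) (mode : String), Dom_split_docs text mode → Spec_split_docs text mode (split_docs text mode)

-- ===== LEMMAS AND PROOFS =====

-- A's loop in CPS form: the pending accumulator, flushed at the end
def pvChunksP (cur : List String) : List String → List String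
  | [] => if cur = [] then [] else [PySem.Str.join "\n" cur]
  | line :: rest =>
    if PySem.Str.strip line != "" then pvChunksP (cur ++ [line]) rest
    else (if cur = [] then [] else [PySem.Str.join "\n" cur]) ++ pvChunksP [] rest

theorem pvLoopA_eq (lines : List String) : ∀ (docs cur : List String),
    (let s := pvLoopA lines docs cur
     if s.2 != [] then s.1 ++ [PySem.Str.join "\n" s.2] else s.1) = docs ++ pvChunksP cur lines := by
  induction lines with
  | nil =>
    intro docs cur
    by_cases h : cur = [] <;> simp [pvLoopA, pvChunksP, h]
  | cons line rest ih =>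
    intro docs cur
    by_cases h : PySem.Str.strip line = ""
    · by_cases hc : cur = []
      · simpa [pvLoopA, pvChunksP, h, hc] using ih docs []
      · simpa [pvLoopA, pvChunksP, h, hc] using ih (docs ++ [PySem.Str.join "\n" cur]) []
    · simpa [pvLoopA, pvChunksP, h] using ih docs (cur ++ [line])

theorem pvChunksP_nonempty (lines : List String) : ∀ (cur : List String), cur ≠ [] →
    pvChunksP cur lines =
      PySem.Str.join "\n" (cur ++ lines.takeWhile (fun x => PySem.Str.strip x != "")) ::
        pvChunksP [] (lines.dropWhile (fun x => PySem.Str.strip x != "")) := by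
  induction lines with
  | nil => intro cur hc; simp [pvChunksP, hc]
  | cons line rest ih =>
    intro cur hc
    by_cases h : PySem.Str.strip line = ""
    · simp [pvChunksP, h, hc]
    · have hne : cur ++ [line] ≠ [] := by simp
      simp [pvChunksP, h, ih _ hne]

theorem pvChunksP_nil_eq (lines : List String) : pvChunksP [] lines = pvChunks lines := by
  induction lines using pvChunks.induct with
  | case1 => simp [pvChunksP, pvChunks]
  | case2 line rest h ih =>
    have h' : PySem.Str.strip line = "" := by simpa using h
    simp [pvChunksP, pvChunks, h', ih]
  | case3 line rest h ih =>
    have hne : ([] : List String) ++ [line] ≠ [] := by simp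
    rw [pvChunksP, if_pos (by simpa using h), pvChunksP_nonempty _ _ (by simp), ih]
    simp [pvChunks, h]

-- ===== VERDICT (by name: the statement is the Claim_ definition above) =====
theorem split_docs_spec : Claim_equal_split_docs := by
  intro text mode _
  unfold Spec_split_docs split_docs split_docs_alt
  by_cases hm : mode == "lines"
  · simp [hm]
  · simp only [hm, Bool.false_eq_true, if_false]
    rw [show (let s := pvLoopA (PySem.Str.splitlines text) [] [];
          if s.2 != [] then s.1 ++ [PySem.Str.join "\n" s.2] else s.1) =
        [] ++ pvChunksP [] (PySem.Str.splitlines text) from pvLoopA_eq _ [] []]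
    simp [pvChunksP_nil_eq]
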